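-- pv_equiv track=rewrite | github.com/thegeek-sys/uni | FP/ESAMS-GH/Esami/2022-2023/Esame-6_solved/program.py | aux_1
-- ===== SOURCE A (Python) =====
-- def aux_1(face, faces, n, l=1):
--     rez = []
--     if n == l:
--         return face
--     else:
--         for i in face:
--             for j in faces:
--                 tu = i + (j,)
--                 rez.append(tu)
--         rez = aux_1(rez, faces, n, l+1)
--     return rez
-- ===== SOURCE B (Python) =====
-- def aux_1(face, faces, n, l=1):
--     # Iterative version: one expansion pass per remaining level instead of recursion.
--     rez = face
--     for _ in range(n - l):
--         rez = [i + (j,) for i in rez for j in faces]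
--     return rez
-- ===== Notes on version B (the rewrite author's own statement) =====
-- stated objective: simpler
-- what changed: Replaces the tail recursion (which recurses once per level and never terminates when l > n) with a flat for-loop over range(n - l) that rebuilds the list once per level.
-- crash fix: When l > n (e.g. n=0 with the default l=1) A recurses past n forever and raises RecursionError; B's loop runs zero times and returns face unchanged. — e.g. on aux_1([[1]], [2], 0, 1): A raises RecursionError, B returns [[1]]
import Mathlib
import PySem

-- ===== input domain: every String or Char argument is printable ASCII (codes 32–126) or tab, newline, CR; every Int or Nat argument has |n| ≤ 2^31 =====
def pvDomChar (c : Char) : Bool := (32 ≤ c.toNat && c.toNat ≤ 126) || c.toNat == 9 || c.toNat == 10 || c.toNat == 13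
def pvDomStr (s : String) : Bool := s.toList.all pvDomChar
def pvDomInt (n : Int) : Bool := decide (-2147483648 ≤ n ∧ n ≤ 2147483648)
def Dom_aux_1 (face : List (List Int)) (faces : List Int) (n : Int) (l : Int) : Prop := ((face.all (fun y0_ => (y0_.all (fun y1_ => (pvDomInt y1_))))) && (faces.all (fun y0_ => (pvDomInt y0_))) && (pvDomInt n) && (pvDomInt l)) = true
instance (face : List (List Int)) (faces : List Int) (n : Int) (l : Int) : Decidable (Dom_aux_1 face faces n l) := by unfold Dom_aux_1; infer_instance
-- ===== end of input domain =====

-- B replaces A's tail recursion by an iterative pass per level (objective: simpler);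
-- equivalence is about the return value only.

-- ===== PORT A =====
-- A: if n == l return face; else one expansion pass (nested for-loops appending i+(j,)),
-- then recurse with l+1. When l > n Python recurses forever (RecursionError) — excluded
-- by Pre_; the `else []` branch below is only reached there, outside every claim.
def aux_1 (face : List (List Int)) (faces : List Int) (n : Int) (l : Int) : List (List Int) :=
  if n = l then face
  else
    let rez := face.foldl (fun rez i => faces.foldl (fun rez j => rez ++ [i ++ [j]]) rez) []
    if _h : l < n then aux_1 rez faces n (l + 1) else []
termination_by (n - l).toNat
decreasing_by omega

-- ===== PORT B =====
-- one expansion pass: [i + (j,) for i in rez for j in faces]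
def aux_1_step (faces : List Int) (rez : List (List Int)) : List (List Int) :=
  rez.flatMap (fun i => faces.map (fun j => i ++ [j]))

-- B: rez = face; for _ in range(n - l): rez = step(rez); return rez
def aux_1_alt (face : List (List Int)) (faces : List Int) (n : Int) (l : Int) : List (List Int) :=
  (PySem.List.pyRange 0 (n - l) 1).foldl (fun rez _ => aux_1_step faces rez) face

-- ===== PRECONDITION & SPEC =====
-- Pre_ excludes l > n, where Python A recurses without a base case and raises RecursionError.
def Pre_aux_1 (face : List (List Int)) (faces : List Int) (n : Int) (l : Int) : Prop := l ≤ n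
instance (face : List (List Int)) (faces : List Int) (n : Int) (l : Int) : Decidable (Pre_aux_1 face faces n l) := by unfold Pre_aux_1; infer_instance
def pvWitness_aux_1 : List (List Int) × List Int × Int × Int := ([[1], [2]], [0, 1], 3, 1)

-- When l > n (e.g. n = 0 with the default l = 1) A raises RecursionError; B's loop runs zero times and returns face unchanged.
def Raises_aux_1 (face : List (List Int)) (faces : List Int) (n : Int) (l : Int) : Prop := n < l
instance (face : List (List Int)) (faces : List Int) (n : Int) (l : Int) : Decidable (Raises_aux_1 face faces n l) := by unfold Raises_aux_1; infer_instance
def pvRaiseWitness_aux_1 : List (List Int) × List Int × Int × Int := ([[1]], [2], 0, 1)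
def pvRaiseWitnessOut_aux_1 : List (List Int) := [[1]]

def Spec_aux_1 (face : List (List Int)) (faces : List Int) (n : Int) (l : Int) (out : List (List Int)) : Prop := out = aux_1_alt face faces n l
instance (face : List (List Int)) (faces : List Int) (n : Int) (l : Int) (out : List (List Int)) : Decidable (Spec_aux_1 face faces n l out) := by unfold Spec_aux_1; infer_instance

-- ===== CLAIM (what is proved, stated in full; the proofs are below) =====
def Claim_equal_aux_1 : Prop := ∀ (face : List (List Int)) (faces : List Int) (n : Int) (l : Int), Dom_aux_1 face faces n l → Pre_aux_1 face faces n l → Spec_aux_1 face faces n l (aux_1 face faces n l)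
def Claim_raises_aux_1 : Prop := (∀ (face : List (List Int)) (faces : List Int) (n : Int) (l : Int), Dom_aux_1 face faces n l → Raises_aux_1 face faces n l → ¬ Pre_aux_1 face faces n l) ∧ (Dom_aux_1 (pvRaiseWitness_aux_1.1) (pvRaiseWitness_aux_1.2.1) (pvRaiseWitness_aux_1.2.2.1) (pvRaiseWitness_aux_1.2.2.2) ∧ Raises_aux_1 (pvRaiseWitness_aux_1.1) (pvRaiseWitness_aux_1.2.1) (pvRaiseWitness_aux_1.2.2.1) (pvRaiseWitness_aux_1.2.2.2) ∧ aux_1_alt (pvRaiseWitness_aux_1.1) (pvRaiseWitness_aux_1.2.1) (pvRaiseWitness_aux_1.2.2.1) (pvRaiseWitness_aux_1.2.2.2) = pvRaiseWitnessOut_aux_1)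

-- ===== LEMMAS AND PROOFS =====

-- A's nested append-loops compute exactly one expansion pass.
lemma aux_1_pass (face : List (List Int)) (faces : List Int) :
    face.foldl (fun rez i => faces.foldl (fun rez j => rez ++ [i ++ [j]]) rez) [] =
      aux_1_step faces face := by
  have h : ∀ (i : List Int) (rez : List (List Int)),
      faces.foldl (fun rez j => rez ++ [i ++ [j]]) rez = rez ++ faces.map (fun j => i ++ [j]) :=
    fun i rez => PySem.List.foldl_append_singleton_eq_map (fun j => i ++ [j]) faces rez
  calc face.foldl (fun rez i => faces.foldl (fun rez j => rez ++ [i ++ [j]]) rez) []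
      = face.foldl (fun rez i => rez ++ faces.map (fun j => i ++ [j])) [] := by
        have hf : (fun rez (i : List Int) => faces.foldl (fun rez j => rez ++ [i ++ [j]]) rez) =
            fun rez (i : List Int) => rez ++ faces.map (fun j => i ++ [j]) := by
          funext rez i; exact h i rez
        rw [hf]
    _ = aux_1_step faces face := by
        simpa [aux_1_step] using
          PySem.List.foldl_append_eq_flatMap (fun i => faces.map (fun j => i ++ [j])) face ([] : List (List Int))

-- a fold that ignores the list elements is iteration
lemma foldl_ignore (g : List (List Int) → List (List Int)) :
    ∀ (xs : List Int) (init : List (List Int)),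
      xs.foldl (fun r _ => g r) init = g^[xs.length] init := by
  intro xs
  induction xs with
  | nil => intro init; simp
  | cons x xs ih => intro init; simp [List.foldl_cons, ih, Function.iterate_succ_apply]

lemma aux_1_alt_iter (face : List (List Int)) (faces : List Int) (n l : Int) :
    aux_1_alt face faces n l = (aux_1_step faces)^[(n - l).toNat] face := by
  rw [aux_1_alt, foldl_ignore, PySem.List.length_pyRange_one]
  simp

lemma aux_1_iter (faces : List Int) (n : Int) :
    ∀ (k : ℕ) (face : List (List Int)) (l : Int), l ≤ n → (n - l).toNat = k →
      aux_1 face faces n l = (aux_1_step faces)^[k] face := by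
  intro k
  induction k with
  | zero =>
    intro face l hle hk
    have : n = l := by omega
    rw [aux_1]; simp [this]
  | succ k ih =>
    intro face l hle hk
    have hlt : l < n := by omega
    have hne : n ≠ l := by omega
    rw [aux_1]
    simp only [hne, if_false, hlt, dif_pos]
    rw [aux_1_pass, ih (aux_1_step faces face) (l + 1) (by omega) (by omega),
      Function.iterate_succ_apply]

-- ===== VERDICT (by name: the statement is the Claim_ definition above) =====
theorem aux_1_spec : Claim_equal_aux_1 := by
  intro face faces n l _ hpre
  unfold Spec_aux_1
  rw [aux_1_alt_iter, aux_1_iter faces n (n - l).toNat face l hpre rfl]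

@[simp] theorem aux_1_raises : Claim_raises_aux_1 := by
  unfold Claim_raises_aux_1
  exact ⟨fun face faces n l _ h => by unfold Raises_aux_1 Pre_aux_1 at *; omega, by decide⟩
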